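-- pv_equiv track=rewrite | github.com/PnX-SI/GeoNature | backend/geonature/core/gn_permissions/routes.py | get_access_request_default_permissions
-- ===== SOURCE A (Python) =====
-- import copy
--
-- def get_access_request_default_permissions(request):
--     default_permissions = [
--         {
--             "module_code": "SYNTHESE",
--             "action_code": "R",
--             "object_code": "PRIVATE_OBSERVATION",
--         },
--         {
--             "module_code": "SYNTHESE",
--             "action_code": "E",
--             "object_code": "PRIVATE_OBSERVATION",
--         },
--         {
--             "module_code": "VALIDATION",
--             "action_code": "R",
--             "object_code": "PRIVATE_OBSERVATION",
--         },
--     ]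
--
--     # Add new permissions for sensitive observations
--     if (request["sensitive_access"] is True):
--         default_sensitive_permissions = copy.deepcopy(default_permissions)
--         for permission in default_sensitive_permissions:
--             permission["object_code"] = "SENSITIVE_OBSERVATION"
--         default_permissions.extend(default_sensitive_permissions)
--
--     return default_permissions
-- ===== SOURCE B (Python) =====
-- def get_access_request_default_permissions(request):
--     base = [("SYNTHESE", "R"), ("SYNTHESE", "E"), ("VALIDATION", "R")]
--     object_codes = ["PRIVATE_OBSERVATION"]
--     if request["sensitive_access"] is True:
--         object_codes.append("SENSITIVE_OBSERVATION")
--     return [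
--         {"module_code": m, "action_code": a, "object_code": o}
--         for o in object_codes
--         for (m, a) in base
--     ]
-- ===== Notes on version B (the rewrite author's own statement) =====
-- stated objective: simpler
-- what changed: Replaces the literal three-dict list plus deepcopy-and-mutate duplication with direct generation from a compact (module, action) table crossed with the list of object codes in one nested comprehension.
import Mathlib
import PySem

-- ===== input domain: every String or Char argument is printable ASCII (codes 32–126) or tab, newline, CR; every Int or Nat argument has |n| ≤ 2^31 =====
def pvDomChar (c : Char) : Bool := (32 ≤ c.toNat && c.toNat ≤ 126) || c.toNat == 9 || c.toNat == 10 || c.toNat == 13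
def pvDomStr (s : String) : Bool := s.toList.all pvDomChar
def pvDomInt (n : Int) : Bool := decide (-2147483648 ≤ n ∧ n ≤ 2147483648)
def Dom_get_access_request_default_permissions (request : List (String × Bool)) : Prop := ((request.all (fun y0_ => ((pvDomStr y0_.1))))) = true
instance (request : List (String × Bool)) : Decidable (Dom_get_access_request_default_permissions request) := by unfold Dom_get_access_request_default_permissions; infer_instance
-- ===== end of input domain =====

-- B builds the same permissions directly from a compact (module, action) table crossed with the object codes,
-- instead of A's deepcopy-and-mutate duplication. Equal on Pre_ (key "sensitive_access" present).

-- ===== PORT A =====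
-- transliteration of A: literal list of three dicts; if request["sensitive_access"] is True,
-- deepcopy the list, overwrite "object_code" in each copy (Dict.insert = overwrite in place), extend.
def get_access_request_default_permissions (request : List (String × Bool)) : List (List (String × String)) :=
  let default_permissions : List (PySem.Dict String String) :=
    [ PySem.Dict.mk [("module_code", "SYNTHESE"), ("action_code", "R"), ("object_code", "PRIVATE_OBSERVATION")]
    , PySem.Dict.mk [("module_code", "SYNTHESE"), ("action_code", "E"), ("object_code", "PRIVATE_OBSERVATION")]
    , PySem.Dict.mk [("module_code", "VALIDATION"), ("action_code", "R"), ("object_code", "PRIVATE_OBSERVATION")] ]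
  match (PySem.Dict.mk request).get? "sensitive_access" with
  | none => []  -- KeyError in Python; excluded by Pre_
  | some v =>
    if v = true then
      let default_sensitive_permissions :=
        default_permissions.map (fun permission => permission.insert "object_code" "SENSITIVE_OBSERVATION")
      (default_permissions ++ default_sensitive_permissions).map PySem.Dict.items
    else
      default_permissions.map PySem.Dict.items

-- ===== PORT B =====
-- transliteration of B: base table × object codes, one nested comprehension.
def get_access_request_default_permissions_alt (request : List (String × Bool)) : List (List (String × String)) :=
  let base : List (String × String) := [("SYNTHESE", "R"), ("SYNTHESE", "E"), ("VALIDATION", "R")]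
  match (PySem.Dict.mk request).get? "sensitive_access" with
  | none => []  -- KeyError in Python; excluded by Pre_
  | some v =>
    let object_codes : List String :=
      if v = true then ["PRIVATE_OBSERVATION", "SENSITIVE_OBSERVATION"] else ["PRIVATE_OBSERVATION"]
    object_codes.flatMap (fun o =>
      base.map (fun ma => [("module_code", ma.1), ("action_code", ma.2), ("object_code", o)]))

-- ===== PRECONDITION & SPEC =====
-- Pre_ excludes exactly the inputs where A raises KeyError: no "sensitive_access" key in the dict.
def Pre_get_access_request_default_permissions (request : List (String × Bool)) : Prop :=
  ((PySem.Dict.mk request).get? "sensitive_access").isSome = true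
instance (request : List (String × Bool)) : Decidable (Pre_get_access_request_default_permissions request) := by unfold Pre_get_access_request_default_permissions; infer_instance
def pvWitness_get_access_request_default_permissions : (List (String × Bool)) := [("sensitive_access", true)]

def Spec_get_access_request_default_permissions (request : List (String × Bool)) (out : List (List (String × String))) : Prop := out = get_access_request_default_permissions_alt request
instance (request : List (String × Bool)) (out : List (List (String × String))) : Decidable (Spec_get_access_request_default_permissions request out) := by unfold Spec_get_access_request_default_permissions; infer_instance

-- ===== CLAIM (what is proved, stated in full; the proofs are below) =====
def Claim_equal_get_access_request_default_permissions : Prop := ∀ (request : List (String × Bool)), Dom_get_access_request_default_permissions request → Pre_get_access_request_default_permissions request → Spec_get_access_request_default_permissions request (get_access_request_default_permissions request)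

-- ===== LEMMAS AND PROOFS =====

-- ===== VERDICT (by name: the statement is the Claim_ definition above) =====
theorem get_access_request_default_permissions_spec : Claim_equal_get_access_request_default_permissions := by
  intro request _ _
  unfold Spec_get_access_request_default_permissions
  unfold get_access_request_default_permissions get_access_request_default_permissions_alt
  cases h : (PySem.Dict.mk request).get? "sensitive_access" with
  | none => rfl
  | some v => cases v <;> rfl
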